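-- pv_equiv track=rewrite | github.com/TevfikBugra/Graph-Theory-Random-Graphs-Project | Graph-Theory-Project-Codes.py | check_graphicality
-- ===== SOURCE A (Python) =====
-- def check_graphicality(seq_dict):
--     #This function checks the graphicality of a given degree sequence dictionary.
--     #This function is required for sequential algorithm to work.
--     deg_seq = list()
--     for key in list(seq_dict.keys()):
--         deg_seq.append(seq_dict[key])
--     if sum(deg_seq) %2 == 1:                                #check if the sum of the sequence is even
--         return False
--     sorted_degree_sequence = sorted(deg_seq, reverse=True)  #sort the sequence
--     for k in range(1,len(deg_seq)+1):
--         l = list()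
--         for a in sorted_degree_sequence[k:len(deg_seq)+1]:
--             l.append(min(a,k))
--         if sum(sorted_degree_sequence[0:k]) > k*(k-1) + sum(l):     #Erdös-Gallai
--             return False
--     return True
-- ===== SOURCE B (Python) =====
-- def _first_below(deg, k):
--     # first index i with deg[i] < k in the descending-sorted list deg (binary search)
--     lo, hi = 0, len(deg)
--     while lo < hi:
--         mid = (lo + hi) // 2
--         if deg[mid] >= k:
--             lo = mid + 1
--         else:
--             hi = mid
--     return lo
--
-- def check_graphicality(seq_dict):
--     vals = list(seq_dict.values())
--     s = sum(vals)
--     if s % 2 == 1: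
--         return False
--     deg = sorted(vals, reverse=True)
--     n = len(deg)
--     pref, t = [0], 0
--     for v in deg:
--         t += v
--         pref.append(t)
--     for k in range(1, n + 1):
--         c = _first_below(deg, k)      # = number of entries >= k
--         m = c if c > k else k
--         # sum(min(a,k) for a in deg[k:]) == k*(m-k) + s - pref[m]
--         if pref[k] > k * (k - 1) + k * (m - k) + s - pref[m]:
--             return False
--     return True
-- ===== Notes on version B (the rewrite author's own statement) =====
-- stated objective: faster
-- what changed: Replaces the per-k rebuild of the tail term sum(min(a,k)) over the suffix (a quadratic double loop) by one prefix-sum pass plus a binary search for the threshold index where degrees drop below k, so each Erdos-Gallai check costs O(log n).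
import Mathlib
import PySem

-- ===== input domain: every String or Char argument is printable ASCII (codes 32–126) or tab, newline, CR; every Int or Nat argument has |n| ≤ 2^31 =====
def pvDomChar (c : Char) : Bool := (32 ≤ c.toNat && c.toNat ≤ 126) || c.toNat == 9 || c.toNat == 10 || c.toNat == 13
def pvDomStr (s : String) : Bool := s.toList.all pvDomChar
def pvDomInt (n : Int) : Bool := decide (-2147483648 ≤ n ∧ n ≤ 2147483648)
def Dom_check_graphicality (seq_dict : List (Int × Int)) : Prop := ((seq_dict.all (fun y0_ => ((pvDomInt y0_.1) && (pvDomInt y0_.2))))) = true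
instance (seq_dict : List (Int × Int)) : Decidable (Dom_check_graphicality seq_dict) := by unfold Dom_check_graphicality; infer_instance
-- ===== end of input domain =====

-- B replaces A's quadratic per-k recomputation of sum(min(a,k)) by prefix sums + a binary search (O(n log n)).

-- ===== PORT A =====
def check_graphicality (seq_dict : List (Int × Int)) : Bool :=
  let d := PySem.Dict.ofList seq_dict
  -- deg_seq.append(seq_dict[key]) for key in keys: every key is a key of d, so getD never uses its default
  let deg_seq := d.keys.foldl (fun acc key => acc ++ [d.getD key 0]) []
  if PySem.Int.mod deg_seq.sum 2 == 1 then false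
  else
    let sorted_degree_sequence := PySem.List.sorted deg_seq (fun x => x) true
    (PySem.List.pyRange 1 ((deg_seq.length : Int) + 1) 1).all (fun k =>
      let l := (PySem.List.slice sorted_degree_sequence (some k) (some ((deg_seq.length : Int) + 1))).foldl
                 (fun acc a => acc ++ [min a k]) []
      decide ((PySem.List.slice sorted_degree_sequence (some 0) (some k)).sum ≤ k * (k - 1) + l.sum))

-- ===== PORT B =====
-- binary search: first index i with deg[i] < k in the descending list deg
-- (deg[mid] is always in range in Python: 0 ≤ lo ≤ mid < hi ≤ len(deg); getD is an exact stand-in)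
def firstBelowLoop (deg : List Int) (k : Int) (lo hi : Nat) : Nat :=
  if _h : lo < hi then
    let mid := (lo + hi) / 2
    if k ≤ deg.getD mid 0 then firstBelowLoop deg k (mid + 1) hi
    else firstBelowLoop deg k lo mid
  else lo
termination_by hi - lo
decreasing_by all_goals omega

def check_graphicality_alt (seq_dict : List (Int × Int)) : Bool :=
  let vals := (PySem.Dict.ofList seq_dict).values
  let s := vals.sum
  if PySem.Int.mod s 2 == 1 then false
  else
    let deg := PySem.List.sorted vals (fun x => x) true
    let n := deg.length
    let ps := deg.foldl (fun (p : List Int × Int) v => (p.1 ++ [p.2 + v], p.2 + v)) ([0], 0)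
    (PySem.List.pyRange 1 ((n : Int) + 1) 1).all (fun k =>
      let c : Int := (firstBelowLoop deg k 0 n : Int)
      let m := if c > k then c else k
      decide (PySem.List.pyGetD ps.1 k 0 ≤ k * (k - 1) + k * (m - k) + s - PySem.List.pyGetD ps.1 m 0))

-- ===== PRECONDITION & SPEC =====
def Spec_check_graphicality (seq_dict : List (Int × Int)) (out : Bool) : Prop := out = check_graphicality_alt seq_dict
instance (seq_dict : List (Int × Int)) (out : Bool) : Decidable (Spec_check_graphicality seq_dict out) := by unfold Spec_check_graphicality; infer_instance

-- ===== CLAIM (what is proved, stated in full; the proofs are below) =====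
def Claim_equal_check_graphicality : Prop := ∀ (seq_dict : List (Int × Int)), Dom_check_graphicality seq_dict → Spec_check_graphicality seq_dict (check_graphicality seq_dict)

-- ===== LEMMAS AND PROOFS =====

theorem pv_all_congr_mem {α : Type} {l : List α} {f g : α → Bool}
    (h : ∀ x ∈ l, f x = g x) : l.all f = l.all g := by
  induction l with
  | nil => rfl
  | cons x xs ih =>
    simp only [List.all_cons, h x (by simp), ih (fun y hy => h y (by simp [hy]))]

theorem pv_psFold (l : List Int) : ∀ (acc : List Int) (s : Int),
    l.foldl (fun (p : List Int × Int) v => (p.1 ++ [p.2 + v], p.2 + v)) (acc, s)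
      = (acc ++ (List.range l.length).map (fun i => s + (l.take (i + 1)).sum), s + l.sum) := by
  induction l with
  | nil => simp
  | cons v t ih =>
    intro acc s
    simp only [List.foldl_cons, ih, List.length_cons, List.range_succ_eq_map,
      List.map_cons, List.map_map, List.sum_cons, List.take_succ_cons]
    rw [Prod.mk.injEq]
    constructor
    · simp only [List.append_assoc, List.singleton_append, List.take_zero, List.sum_nil, add_zero]
      congr 1
      congr 1
      refine List.map_congr_left ?_
      intro i _
      simp only [Function.comp_apply]
      ring
    · ring

theorem pv_fbl_spec (deg : List Int) (k : Int)
    (hmono : ∀ i j : Nat, i ≤ j → j < deg.length → deg.getD j 0 ≤ deg.getD i 0) :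
    ∀ fuel lo hi : Nat, hi - lo ≤ fuel → lo ≤ hi → hi ≤ deg.length →
    (∀ j, j < lo → k ≤ deg.getD j 0) →
    (∀ j, hi ≤ j → j < deg.length → deg.getD j 0 < k) →
    firstBelowLoop deg k lo hi ≤ deg.length ∧
    (∀ j, j < firstBelowLoop deg k lo hi → k ≤ deg.getD j 0) ∧
    (∀ j, firstBelowLoop deg k lo hi ≤ j → j < deg.length → deg.getD j 0 < k) := by
  intro fuel
  induction fuel with
  | zero =>
    intro lo hi hf hlh hhl hbelow habove
    have hlo : lo = hi := by omega
    rw [firstBelowLoop, dif_neg (by omega)]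
    exact ⟨by omega, hbelow, fun j hj hjl => habove j (by omega) hjl⟩
  | succ fuel ih =>
    intro lo hi hf hlh hhl hbelow habove
    by_cases h : lo < hi
    · rw [firstBelowLoop, dif_pos h]
      set mid := (lo + hi) / 2 with hmid
      have hmlt : mid < hi := by omega
      have hmge : lo ≤ mid := by omega
      by_cases hc : k ≤ deg.getD mid 0
      · simp only [if_pos hc]
        exact ih (mid + 1) hi (by omega) (by omega) hhl
          (fun j hj => le_trans hc (hmono j mid (by omega) (by omega)))
          habove
      · simp only [if_neg hc]
        exact ih lo mid (by omega) (by omega) (by omega) hbelow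
          (fun j hj hjl => lt_of_le_of_lt (hmono mid j hj hjl) (by omega))
    · rw [firstBelowLoop, dif_neg h]
      exact ⟨by omega, hbelow, fun j hj hjl => habove j (by omega) hjl⟩

theorem pv_sum_min_all_ge {k : Int} : ∀ {l : List Int}, (∀ a ∈ l, k ≤ a) →
    (l.map (fun a => min a k)).sum = k * l.length := by
  intro l
  induction l with
  | nil => simp
  | cons x t ih =>
    intro h
    have hx : min x k = k := min_eq_right (h x (by simp))
    simp only [List.map_cons, List.sum_cons, hx, ih (fun a ha => h a (by simp [ha])),
      List.length_cons]
    push_cast; ring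

theorem pv_sum_min_all_lt {k : Int} : ∀ {l : List Int}, (∀ a ∈ l, a < k) →
    (l.map (fun a => min a k)).sum = l.sum := by
  intro l
  induction l with
  | nil => simp
  | cons x t ih =>
    intro h
    have hx : min x k = x := min_eq_left (le_of_lt (h x (by simp)))
    simp [hx, ih (fun a ha => h a (by simp [ha]))]

-- the prefix-sum list: entry j (j ≤ length) is the sum of the first j elements
theorem pv_pref_getD (deg : List Int) (j : Nat) (hj : j ≤ deg.length) :
    (([0] : List Int) ++ (List.range deg.length).map (fun i => (deg.take (i + 1)).sum)).getD j 0
      = (deg.take j).sum := by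
  cases j with
  | zero => simp
  | succ i =>
    have hi : i < deg.length := by omega
    simp [List.getD, List.getElem?_map, List.getElem?_range hi]

-- ===== VERDICT (by name: the statement is the Claim_ definition above) =====
theorem check_graphicality_spec : Claim_equal_check_graphicality := by
  intro sd _
  unfold Spec_check_graphicality check_graphicality check_graphicality_alt
  -- A's deg_seq is exactly the value list of the dict
  have hvals : (PySem.Dict.ofList sd).keys.foldl
      (fun acc key => acc ++ [(PySem.Dict.ofList sd).getD key 0]) []
      = (PySem.Dict.ofList sd).values := by
    rw [PySem.List.foldl_append_singleton_eq_map, List.nil_append,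
      ← PySem.Dict.values_eq_map_keys _ (PySem.Dict.nodup_keys_ofList sd) 0]
  simp only [hvals]
  set vals := (PySem.Dict.ofList sd).values with hv
  set deg := PySem.List.sorted vals (fun x => x) true with hdeg
  have hlen : deg.length = vals.length := PySem.List.length_sorted vals _ true
  have hsum : deg.sum = vals.sum := (PySem.List.sorted_perm vals _ true).sum_eq
  rw [pv_psFold]
  simp only [zero_add]
  rw [← hsum, ← hlen]
  congr 1
  apply pv_all_congr_mem
  intro k hk
  rw [PySem.List.mem_pyRange_one] at hk
  -- per-k facts
  have hk0 : 0 ≤ k := by omega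
  have hkn : k ≤ (deg.length : Int) := by omega
  set n := deg.length with hn
  set kN := k.toNat with hkN
  have hkc : k = (kN : Int) := (Int.toNat_of_nonneg hk0).symm
  have hkNn : kN ≤ n := by omega
  -- the binary search
  have hpair : deg.Pairwise (fun a b => b ≤ a) := PySem.List.sorted_pairwise_rev vals (fun x => x)
  have hmono : ∀ i j : Nat, i ≤ j → j < deg.length → deg.getD j 0 ≤ deg.getD i 0 := by
    intro i j hij hj
    rcases eq_or_lt_of_le hij with rfl | hlt
    · exact le_refl _
    · rw [List.getD_eq_getElem _ _ hj, List.getD_eq_getElem _ _ (by omega)]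
      exact List.pairwise_iff_getElem.mp hpair i j (by omega) hj hlt
  set r := firstBelowLoop deg k 0 n with hr
  obtain ⟨hrle, hbelow, habove⟩ :=
    pv_fbl_spec deg k hmono n 0 n (by omega) (by omega) (le_refl n)
      (fun j hj => absurd hj (by omega)) (fun j hj hjl => absurd (lt_of_le_of_lt hj hjl) (by omega))
  set mN := max r kN with hmN
  have hmNn : mN ≤ n := by omega
  have hmc : (if (r : Int) > k then (r : Int) else k) = (mN : Int) := by
    rw [hmN, Nat.cast_max]
    rcases le_or_gt (r : Int) k with h | h
    · rw [if_neg (by omega)]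
      omega
    · rw [if_pos h]
      omega
  rw [hmc]
  have hm0 : (0:Int) ≤ (mN : Int) := by positivity
  -- the slices
  have hsl0 : PySem.List.slice deg (some 0) (some k) = deg.take kN := by
    rw [hkc, show ((0:Int)) = ((0:Nat):Int) from rfl, PySem.List.slice_natCast]
    simp
  have hsl1 : PySem.List.slice deg (some k) (some ((n:Int) + 1)) = deg.drop kN := by
    rw [hkc, show ((n:Int) + 1) = ((n+1 : Nat):Int) by push_cast; ring, PySem.List.slice_natCast]
    exact List.take_of_length_le (by simp; omega)
  -- the prefix sums
  have hprefk : PySem.List.pyGetD (([0] : List Int) ++ (List.range n).map (fun i => (deg.take (i + 1)).sum)) k 0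
      = (deg.take kN).sum := by
    rw [PySem.List.pyGetD_of_nonneg _ _ hk0, ← hkN]
    exact pv_pref_getD deg kN hkNn
  have hprefm : PySem.List.pyGetD (([0] : List Int) ++ (List.range n).map (fun i => (deg.take (i + 1)).sum)) (mN : Int) 0
      = (deg.take mN).sum := by
    rw [PySem.List.pyGetD_of_nonneg _ _ hm0, Int.toNat_natCast]
    exact pv_pref_getD deg mN hmNn
  rw [hsl0, hsl1, hprefk, hprefm, PySem.List.foldl_append_singleton_eq_map, List.nil_append]
  -- the tail-sum identity
  have hsplit : deg.drop kN = (deg.drop kN).take (mN - kN) ++ deg.drop mN := by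
    conv_lhs => rw [← List.take_append_drop (mN - kN) (deg.drop kN)]
    rw [List.drop_drop]
    have hx : kN + (mN - kN) = mN := by omega
    rw [hx]
  have hlen1 : ((deg.drop kN).take (mN - kN)).length = mN - kN := by
    simp; omega
  have hge : ∀ a ∈ (deg.drop kN).take (mN - kN), k ≤ a := by
    intro a ha
    obtain ⟨i, hi, rfl⟩ := List.mem_iff_getElem.mp ha
    rw [List.getElem_take, List.getElem_drop]
    have hj : kN + i < mN := by omega
    have hjn : kN + i < n := by omega
    have hjr : kN + i < r := by omega
    have := hbelow (kN + i) hjr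
    rwa [List.getD_eq_getElem _ _ hjn] at this
  have hlt : ∀ a ∈ deg.drop mN, a < k := by
    intro a ha
    obtain ⟨i, hi, rfl⟩ := List.mem_iff_getElem.mp ha
    rw [List.getElem_drop]
    have hi' : i < deg.length - mN := by simpa using hi
    have hjn : mN + i < n := by omega
    have := habove (mN + i) (by omega) hjn
    rwa [List.getD_eq_getElem _ _ hjn] at this
  have htail : ((deg.drop kN).map (fun a => min a k)).sum
      = k * ((mN : Int) - k) + deg.sum - (deg.take mN).sum := by
    rw [hsplit, List.map_append, List.sum_append, pv_sum_min_all_ge hge, pv_sum_min_all_lt hlt,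
      hlen1]
    have hds : (deg.take mN).sum + (deg.drop mN).sum = deg.sum := List.sum_take_add_sum_drop deg mN
    have hcast : ((mN - kN : Nat) : Int) = (mN : Int) - k := by rw [hkc]; omega
    rw [hcast]
    omega
  rw [decide_eq_decide]
  constructor
  · intro h; linarith [htail]
  · intro h; linarith [htail]
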